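-- pv_equiv track=rewrite | github.com/putara/emoji-droid | gen_ttx.py | get_rtl_seq
-- ===== SOURCE A (Python) =====
-- def get_rtl_seq(seq):
--   """Return the rtl variant of the sequence, if it has one, else the empty
--   sequence.
--   """
--   # Sequences with ZWJ in them will reflect.  Fitzpatrick modifiers
--   # however do not, so if we reflect we make a pass to swap them back into their
--   # logical order.
--   # Used to check for TAG_END 0xe007f as well but Android fontchain_lint
--   # dislikes the resulting mangling of flags for England, Scotland, Wales.
--
--   ZWJ = 0x200d
--   def is_fitzpatrick(cp):
--     return 0x1f3fb <= cp <= 0x1f3ff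
--
--   if ZWJ not in seq:
--     return ()
--
--   rev_seq = list(seq)
--   rev_seq.reverse()
--   for i in range(1, len(rev_seq)):
--     if is_fitzpatrick(rev_seq[i-1]):
--       tmp = rev_seq[i]
--       rev_seq[i] = rev_seq[i-1]
--       rev_seq[i-1] = tmp
--   return tuple(rev_seq)
-- ===== SOURCE B (Python) =====
-- def get_rtl_seq(seq):
--   """Return the rtl variant of the sequence, if it has one, else the empty
--   sequence."""
--   ZWJ = 0x200d
--   def is_fitzpatrick(cp):
--     return 0x1f3fb <= cp <= 0x1f3ff
--
--   if ZWJ not in seq: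
--     return ()
--
--   # Single right-to-left pass threading a `cur` accumulator: a fitzpatrick
--   # modifier held in `cur` keeps bubbling leftward-elements past itself.
--   cur = seq[-1]
--   out = []
--   for x in seq[-2::-1]:
--     if is_fitzpatrick(cur):
--       out.append(x)
--     else:
--       out.append(cur)
--       cur = x
--   out.append(cur)
--   return tuple(out)
-- ===== Notes on version B (the rewrite author's own statement) =====
-- stated objective: simpler
-- what changed: Replaces A's reverse-the-list-then-in-place-adjacent-swap index loop by a single right-to-left pass over the original sequence threading a `cur` accumulator (a fitzpatrick modifier held in `cur` bubbles following elements past itself), with no list copy, reversal or mutation.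
import Mathlib
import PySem

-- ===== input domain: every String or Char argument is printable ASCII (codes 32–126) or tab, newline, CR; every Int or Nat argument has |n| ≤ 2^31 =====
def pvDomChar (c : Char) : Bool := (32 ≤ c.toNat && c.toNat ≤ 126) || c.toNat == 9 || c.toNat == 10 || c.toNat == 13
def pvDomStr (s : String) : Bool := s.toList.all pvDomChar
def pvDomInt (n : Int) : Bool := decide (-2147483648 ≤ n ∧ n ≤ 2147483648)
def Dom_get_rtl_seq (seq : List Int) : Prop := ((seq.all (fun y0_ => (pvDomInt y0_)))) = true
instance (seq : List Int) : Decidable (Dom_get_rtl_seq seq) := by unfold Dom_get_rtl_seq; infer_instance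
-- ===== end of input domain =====

-- B replaces A's reverse-then-in-place-swap loop by one right-to-left pass threading a `cur`
-- accumulator (objective: simpler; same O(n) cost).

-- ===== PORT A =====
def pvIsFitz (cp : Int) : Bool := 0x1f3fb ≤ cp && cp ≤ 0x1f3ff

-- one iteration of A's loop body at index i (the loop keeps i in range, so getD is exact)
def pvStepA (l : List Int) (i : Nat) : List Int :=
  if pvIsFitz (l.getD (i - 1) 0) then
    let tmp := l.getD i 0
    (l.set i (l.getD (i - 1) 0)).set (i - 1) tmp
  else l

def get_rtl_seq (seq : List Int) : List Int :=
  if (0x200d : Int) ∈ seq then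
    -- rev_seq = list(seq); rev_seq.reverse(); for i in range(1, len(rev_seq)): …
    -- (range(1, n) = List.range' 1 (n-1); both bounds are nonnegative here, so this is exact)
    let rev_seq := seq.reverse
    (List.range' 1 (rev_seq.length - 1)).foldl pvStepA rev_seq
  else []

-- ===== PORT B =====
-- Source B's loop over seq[-2::-1] with accumulator `cur`, appending to `out`;
-- written as the obvious structural recursion producing out ++ [final cur].
def pvAltLoop (cur : Int) (rest : List Int) : List Int :=
  match rest with
  | [] => [cur]
  | x :: xs => if pvIsFitz cur then x :: pvAltLoop cur xs else cur :: pvAltLoop x xs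

def get_rtl_seq_alt (seq : List Int) : List Int :=
  if (0x200d : Int) ∈ seq then
    match seq.reverse with
    | [] => []            -- unreachable: ZWJ ∈ seq means seq ≠ []
    | c :: r => pvAltLoop c r
  else []

-- ===== PRECONDITION & SPEC =====
def Spec_get_rtl_seq (seq : List Int) (out : List Int) : Prop := out = get_rtl_seq_alt seq
instance (seq : List Int) (out : List Int) : Decidable (Spec_get_rtl_seq seq out) := by unfold Spec_get_rtl_seq; infer_instance

-- ===== CLAIM (what is proved, stated in full; the proofs are below) =====
def Claim_equal_get_rtl_seq : Prop := ∀ (seq : List Int), Dom_get_rtl_seq seq → Spec_get_rtl_seq seq (get_rtl_seq seq)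

-- ===== LEMMAS AND PROOFS =====

theorem pvGetD_at (done : List Int) (y : Int) (rest : List Int) :
    (done ++ y :: rest).getD done.length 0 = y := by
  induction done with
  | nil => rfl
  | cons a t ih => simp [ih]

theorem pvSet_at (done : List Int) (y z : Int) (rest : List Int) :
    (done ++ y :: rest).set done.length z = done ++ z :: rest := by
  induction done with
  | nil => rfl
  | cons a t ih => simp [ih]

theorem pvGetD_at_succ (done : List Int) (y x : Int) (rest : List Int) :
    (done ++ y :: x :: rest).getD (done.length + 1) 0 = x := by
  have := pvGetD_at (done ++ [y]) x rest
  simpa using this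

theorem pvSet_at_succ (done : List Int) (y x z : Int) (rest : List Int) :
    (done ++ y :: x :: rest).set (done.length + 1) z = done ++ y :: z :: rest := by
  have := pvSet_at (done ++ [y]) x z rest
  simpa using this

-- loop invariant: the finished prefix `done` plus A's remaining swaps equal B's pass
theorem pvLoop_eq (rest : List Int) : ∀ (done : List Int) (cur : Int),
    (List.range' (done.length + 1) rest.length).foldl pvStepA (done ++ cur :: rest)
      = done ++ pvAltLoop cur rest := by
  induction rest with
  | nil => intro done cur; simp [pvAltLoop]
  | cons x xs ih =>
    intro done cur
    rw [List.length_cons, List.range'_succ, List.foldl_cons]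
    by_cases h : pvIsFitz cur = true
    · have hstep : pvStepA (done ++ cur :: x :: xs) (done.length + 1)
          = done ++ x :: cur :: xs := by
        simp only [pvStepA, Nat.add_sub_cancel, pvGetD_at, pvGetD_at_succ, h, if_pos]
        rw [pvSet_at_succ, pvSet_at]
      rw [hstep]
      have := ih (done ++ [x]) cur
      simpa [pvAltLoop, h] using this
    · have hstep : pvStepA (done ++ cur :: x :: xs) (done.length + 1)
          = done ++ cur :: x :: xs := by
        simp [pvStepA, h]
      rw [hstep]
      have := ih (done ++ [cur]) x
      simpa [pvAltLoop, h] using this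

-- ===== VERDICT (by name: the statement is the Claim_ definition above) =====
theorem get_rtl_seq_spec : Claim_equal_get_rtl_seq := by
  intro seq _
  unfold Spec_get_rtl_seq get_rtl_seq get_rtl_seq_alt
  by_cases h : (0x200d : Int) ∈ seq
  · simp only [h, if_pos]
    cases hrev : seq.reverse with
    | nil => rfl
    | cons c r =>
      have := pvLoop_eq r [] c
      simpa using this
  · simp [h]
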